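-- pv_equiv track=rewrite | github.com/WhiteGobo/SurfaceOrganizer | utils/surface_functions.py | _get_neighbours_to_border
-- ===== SOURCE A (Python) =====
-- def _get_neighbours_to_border( vert_to_face, border_indices, cornpoints ):
--     """
--     :param faces_vertexindices_set: A list of all the faces. Each face is
--                 represented by a set of the verticeindices
--     """
--     neighbours = { v:set() for v in cornpoints }
--
--     tobevisited = list( neighbours.keys() )
--     for v_source in tobevisited:
--         for face in vert_to_face[ v_source ]:
--             notborderindices = set(face).difference( border_indices )
--             if notborderindices != set():
--                 neighbours[ v_source ].update( notborderindices )
--             else: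
--                 for v in face:
--                     if v not in neighbours.keys():
--                         tobevisited.append( v )
--                         neighbours[ v ] = neighbours[ v_source ]
--     for point in cornpoints:
--         yield set( neighbours[ point ] ).difference( border_indices )
-- ===== SOURCE B (Python) =====
-- def _get_neighbours_to_border(vert_to_face, border_indices, cornpoints):
--     """Two-phase re-implementation: (1) a pure grouping BFS assigns every
--     reachable vertex a group id (its seeding corner point, first-wins);
--     (2) each group's neighbour set is accumulated in one pass over the
--     discovery order.  No shared mutable sets."""
--     border = set(border_indices)
--     group = {}
--     order = []
--     for c in cornpoints:
--         if c not in group: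
--             group[c] = c
--             order.append(c)
--     i = 0
--     while i < len(order):
--         v = order[i]
--         i += 1
--         for face in vert_to_face[v]:
--             if not set(face) - border:
--                 for u in face:
--                     if u not in group:
--                         group[u] = group[v]
--                         order.append(u)
--     result = {c: set() for c in cornpoints}
--     for v in order:
--         s = result[group[v]]
--         for face in vert_to_face[v]:
--             s |= set(face) - border
--     for p in cornpoints:
--         yield result[p] - border
-- ===== Notes on version B (the rewrite author's own statement) =====
-- stated objective: alternative
-- what changed: A's single BFS that mutates Python set objects shared by aliasing (neighbours[v] = neighbours[v_source]) is replaced by two independent phases: a pure grouping BFS assigning each reachable vertex a group id (its seeding corner, first-wins), then one accumulation pass over the discovery order that unions each vertex's non-border face contributions into its group's set.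
-- outside the precondition, e.g. on _get_neighbours_to_border({0: [], 5: [[1]]}, {1}, [0]): A returns [set()], B returns [set()]
import Mathlib
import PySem

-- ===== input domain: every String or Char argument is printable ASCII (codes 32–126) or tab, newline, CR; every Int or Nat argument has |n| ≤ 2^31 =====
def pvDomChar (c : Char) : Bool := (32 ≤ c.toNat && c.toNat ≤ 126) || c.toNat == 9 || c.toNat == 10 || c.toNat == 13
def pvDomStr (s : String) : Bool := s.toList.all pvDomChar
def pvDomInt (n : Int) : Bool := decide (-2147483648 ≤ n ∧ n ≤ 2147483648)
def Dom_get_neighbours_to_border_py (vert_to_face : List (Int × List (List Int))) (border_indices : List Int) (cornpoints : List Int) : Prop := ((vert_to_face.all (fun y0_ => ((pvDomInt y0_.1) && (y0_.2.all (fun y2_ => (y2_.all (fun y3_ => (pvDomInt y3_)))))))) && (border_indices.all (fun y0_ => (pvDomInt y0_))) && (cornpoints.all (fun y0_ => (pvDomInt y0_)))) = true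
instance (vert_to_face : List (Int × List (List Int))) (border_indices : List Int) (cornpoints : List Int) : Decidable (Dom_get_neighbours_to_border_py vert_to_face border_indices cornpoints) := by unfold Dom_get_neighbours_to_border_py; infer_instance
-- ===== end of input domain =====

-- B replaces A's shared-mutable-set aliasing BFS with two phases: a pure grouping BFS
-- (vertex -> root corner, first-wins) followed by one accumulation pass per discovery
-- order (objective: alternative decomposition, same asymptotic cost).

-- ===== PORT A =====
-- Python's shared mutable set objects (`neighbours[v] = neighbours[v_source]` aliases the
-- seeding corner's set) are modelled exactly by two maps: `owner` (vertex -> root corner of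
-- its group) and `sets` (root -> that group's set); every step below is a step of A's code.
def pvA_face (border_indices : List Int) (root : Int)
    (st : List Int × PySem.Dict Int Int × PySem.Dict Int (PySem.Set Int)) (face : List Int) :
    List Int × PySem.Dict Int Int × PySem.Dict Int (PySem.Set Int) :=
  let nb := PySem.Set.diff (PySem.Set.ofList face) border_indices
  if nb ≠ [] then
    (st.1, st.2.1, st.2.2.modify root [] (fun s => PySem.Set.update s nb))
  else
    face.foldl (fun st2 u =>
      if st2.2.1.contains u then st2
      else (st2.1 ++ [u], st2.2.1.insert u root, st2.2.2)) st

def pvA_loop (vert_to_face : List (Int × List (List Int))) (border_indices : List Int)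
    : Nat → List Int → PySem.Dict Int Int → PySem.Dict Int (PySem.Set Int)
      → (PySem.Dict Int Int × PySem.Dict Int (PySem.Set Int))
  | 0, _, owner, sets => (owner, sets)
  | _ + 1, [], owner, sets => (owner, sets)
  | fuel + 1, v :: rest, owner, sets =>
    let root := owner.getD v v
    let st := (((PySem.Dict.mk vert_to_face).get? v).getD []).foldl
      (pvA_face border_indices root) (rest, owner, sets)
    pvA_loop vert_to_face border_indices fuel st.1 st.2.1 st.2.2

def get_neighbours_to_border_py (vert_to_face : List (Int × List (List Int))) (border_indices : List Int) (cornpoints : List Int) : List (List Int) :=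
  let owner0 : PySem.Dict Int Int := cornpoints.foldl (fun d c => d.insert c c) PySem.Dict.empty
  let sets0 : PySem.Dict Int (PySem.Set Int) := cornpoints.foldl (fun d c => d.insert c PySem.Set.empty) PySem.Dict.empty
  let fuel := cornpoints.length + (vert_to_face.map (fun p => (p.2.map List.length).sum)).sum
  let r := pvA_loop vert_to_face border_indices fuel owner0.keys owner0 sets0
  cornpoints.map (fun p =>
    PySem.Set.diff (PySem.Set.ofList (r.2.getD (r.1.getD p p) [])) border_indices)

-- ===== PORT B =====
def pvB_face (border_indices : List Int) (v : Int)
    (st : List Int × PySem.Dict Int Int) (face : List Int) : List Int × PySem.Dict Int Int :=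
  if PySem.Set.diff (PySem.Set.ofList face) border_indices = [] then
    face.foldl (fun st2 u =>
      if st2.2.contains u then st2
      else (st2.1 ++ [u], st2.2.insert u (st2.2.getD v v))) st
  else st

def pvB_phase1 (vert_to_face : List (Int × List (List Int))) (border_indices : List Int)
    : Nat → List Int → List Int → PySem.Dict Int Int → (List Int × PySem.Dict Int Int)
  | 0, _, done, group => (done, group)
  | _ + 1, [], done, group => (done, group)
  | fuel + 1, v :: rest, done, group =>
    let st := (((PySem.Dict.mk vert_to_face).get? v).getD []).foldl
      (pvB_face border_indices v) (rest, group)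
    pvB_phase1 vert_to_face border_indices fuel st.1 (done ++ [v]) st.2

def pvB_acc (vert_to_face : List (Int × List (List Int))) (border_indices : List Int)
    (group : PySem.Dict Int Int) (res : PySem.Dict Int (PySem.Set Int)) (v : Int) :
    PySem.Dict Int (PySem.Set Int) :=
  let r := group.getD v v
  (((PySem.Dict.mk vert_to_face).get? v).getD []).foldl
    (fun res2 face => res2.insert r (PySem.Set.union (res2.getD r [])
      (PySem.Set.diff (PySem.Set.ofList face) border_indices))) res

def get_neighbours_to_border_py_alt (vert_to_face : List (Int × List (List Int))) (border_indices : List Int) (cornpoints : List Int) : List (List Int) :=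
  let init := cornpoints.foldl (fun (st : List Int × PySem.Dict Int Int) c =>
      if st.2.contains c then st else (st.1 ++ [c], st.2.insert c c)) ([], PySem.Dict.empty)
  let fuel := cornpoints.length + (vert_to_face.map (fun p => (p.2.map List.length).sum)).sum
  let r := pvB_phase1 vert_to_face border_indices fuel init.1 [] init.2
  let res := r.1.foldl (pvB_acc vert_to_face border_indices r.2)
    (cornpoints.foldl (fun d c => d.insert c PySem.Set.empty) PySem.Dict.empty)
  cornpoints.map (fun p => PySem.Set.diff (res.getD p []) border_indices)

-- ===== PRECONDITION & SPEC =====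
-- Python A raises KeyError when the BFS dequeues a vertex that is not a key of
-- vert_to_face.  Pre_ excludes those inputs by a closed-form sufficient condition:
-- all cornpoints are keys, and every vertex of every all-border face of any entry is a
-- key.  This is slightly narrower than "A returns": it also excludes inputs whose only
-- bad all-border face sits in an entry the BFS never reaches (see claim.json cites).
def Pre_get_neighbours_to_border_py (vert_to_face : List (Int × List (List Int))) (border_indices : List Int) (cornpoints : List Int) : Prop :=
  (∀ c ∈ cornpoints, (PySem.Dict.mk vert_to_face).contains c = true) ∧
  (∀ p ∈ vert_to_face, ∀ face ∈ p.2, (∀ x ∈ face, x ∈ border_indices) →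
    ∀ u ∈ face, (PySem.Dict.mk vert_to_face).contains u = true)
instance (vert_to_face : List (Int × List (List Int))) (border_indices : List Int) (cornpoints : List Int) : Decidable (Pre_get_neighbours_to_border_py vert_to_face border_indices cornpoints) := by unfold Pre_get_neighbours_to_border_py; infer_instance

def pvWitness_get_neighbours_to_border_py : (List (Int × List (List Int))) × List Int × List Int :=
  ([(0, [[1, 2], [3]]), (3, [[3, 4]]), (4, [[5, 0]])], [3, 4], [0])

def Spec_get_neighbours_to_border_py (vert_to_face : List (Int × List (List Int))) (border_indices : List Int) (cornpoints : List Int) (out : List (List Int)) : Prop := out = get_neighbours_to_border_py_alt vert_to_face border_indices cornpoints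
instance (vert_to_face : List (Int × List (List Int))) (border_indices : List Int) (cornpoints : List Int) (out : List (List Int)) : Decidable (Spec_get_neighbours_to_border_py vert_to_face border_indices cornpoints out) := by unfold Spec_get_neighbours_to_border_py; infer_instance

-- ===== CLAIM (what is proved, stated in full; the proofs are below) =====
def Claim_equal_get_neighbours_to_border_py : Prop := ∀ (vert_to_face : List (Int × List (List Int))) (border_indices : List Int) (cornpoints : List Int), Dom_get_neighbours_to_border_py vert_to_face border_indices cornpoints → Pre_get_neighbours_to_border_py vert_to_face border_indices cornpoints → Spec_get_neighbours_to_border_py vert_to_face border_indices cornpoints (get_neighbours_to_border_py vert_to_face border_indices cornpoints)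

-- ===== LEMMAS AND PROOFS =====

-- the sets-only projection of A's face step (modify = insert of getD, definitionally)
def pvA_setsStep (border_indices : List Int) (root : Int)
    (sets : PySem.Dict Int (PySem.Set Int)) (face : List Int) : PySem.Dict Int (PySem.Set Int) :=
  let nb := PySem.Set.diff (PySem.Set.ofList face) border_indices
  if nb ≠ [] then sets.insert root (PySem.Set.update (sets.getD root []) nb) else sets

-- loop invariant of A's BFS state
def pvInv (q : List Int) (ow : PySem.Dict Int Int) (sets : PySem.Dict Int (PySem.Set Int)) : Prop :=
  (∀ x ∈ q, ow.contains x = true) ∧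
  (∀ k r, ow.get? k = some r → sets.contains r = true) ∧
  sets.keys.Nodup ∧
  (∀ k s, sets.get? k = some s → s.Nodup)

lemma pvDict_insert_getD_self {ν : Type} (d : PySem.Dict Int ν) (k : Int) (dflt : ν)
    (h : d.contains k = true) (hn : d.keys.Nodup) : d.insert k (d.getD k dflt) = d := by
  apply PySem.Dict.ext
  rw [PySem.Dict.items_insert_of_contains d _ h]
  have hmap : ∀ p ∈ d.items, (if p.1 == k then (k, d.getD k dflt) else p) = p := by
    intro p hp
    by_cases hk : p.1 = k
    · have hp' : (k, p.2) ∈ d.items := by rw [← hk]; exact hp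
      have h2 : d.get? k = some p.2 := PySem.Dict.get?_of_mem_items d hp' hn
      have h3 : d.getD k dflt = p.2 := PySem.Dict.getD_of_get?_eq_some d dflt h2
      simp only [hk, BEq.rfl, if_true, h3]
      exact Prod.ext hk.symm rfl
    · simp [hk]
  rw [List.map_congr_left hmap]; exact List.map_id' _ ▸ rfl

-- B's inner discovery fold: preserves every present binding of the group map
lemma pvB_inner_mono (v : Int) (face : List Int)
    (st : List Int × PySem.Dict Int Int) (k : Int) (r : Int)
    (h : st.2.get? k = some r) :
    (face.foldl (fun st2 u =>
      if st2.2.contains u then st2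
      else (st2.1 ++ [u], st2.2.insert u (st2.2.getD v v))) st).2.get? k = some r := by
  induction face generalizing st with
  | nil => exact h
  | cons u t ih =>
    simp only [List.foldl_cons]
    by_cases hc : st.2.contains u = true
    · simp only [hc, if_true]; exact ih st h
    · simp only [hc, if_false, Bool.false_eq_true]
      apply ih
      have hu : k ≠ u := by
        intro e; subst e
        rw [PySem.Dict.contains_eq_isSome_get?, h] at hc; simp at hc
      simpa [PySem.Dict.get?_insert_of_ne _ _ hu] using h

-- A's inner discovery fold equals B's (plus untouched sets), given v's binding
lemma pvInner_eq (v root : Int) (face : List Int) :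
    ∀ (q : List Int) (ow : PySem.Dict Int Int) (sets : PySem.Dict Int (PySem.Set Int)),
    ow.get? v = some root →
    face.foldl (fun st2 u =>
      if st2.2.1.contains u then st2
      else (st2.1 ++ [u], st2.2.1.insert u root, st2.2.2)) (q, ow, sets)
    = ((face.foldl (fun st2 u =>
        if st2.2.contains u then st2
        else (st2.1 ++ [u], st2.2.insert u (st2.2.getD v v))) (q, ow)).1,
       (face.foldl (fun st2 u =>
        if st2.2.contains u then st2
        else (st2.1 ++ [u], st2.2.insert u (st2.2.getD v v))) (q, ow)).2, sets) := by
  induction face with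
  | nil => intro q ow sets h; rfl
  | cons u t ih =>
    intro q ow sets h
    simp only [List.foldl_cons]
    by_cases hc : ow.contains u = true
    · simp only [hc, if_true]; exact ih q ow sets h
    · simp only [hc, if_false, Bool.false_eq_true]
      have hroot : ow.getD v v = root := PySem.Dict.getD_of_get?_eq_some ow v h
      rw [hroot]
      apply ih
      have hu : v ≠ u := by
        intro e; subst e
        rw [PySem.Dict.contains_eq_isSome_get?, h] at hc; simp at hc
      simpa [PySem.Dict.get?_insert_of_ne _ _ hu] using h

-- A's face fold splits into B's phase-1 face fold and the sets-only fold
lemma pvFace_split (bi : List Int) (v root : Int) (fs : List (List Int)) :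
    ∀ (q : List Int) (ow : PySem.Dict Int Int) (sets : PySem.Dict Int (PySem.Set Int)),
    ow.get? v = some root →
    fs.foldl (pvA_face bi root) (q, ow, sets)
    = ((fs.foldl (pvB_face bi v) (q, ow)).1, (fs.foldl (pvB_face bi v) (q, ow)).2,
       fs.foldl (pvA_setsStep bi root) sets) := by
  induction fs with
  | nil => intro q ow sets h; rfl
  | cons f t ih =>
    intro q ow sets h
    simp only [List.foldl_cons, pvA_face, pvB_face, pvA_setsStep]
    by_cases hnb : PySem.Set.diff (PySem.Set.ofList f) bi = []
    · simp only [hnb, ne_eq, not_true_eq_false, if_false]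
      rw [pvInner_eq v root f q ow sets h]
      exact ih _ _ _ (pvB_inner_mono v f (q, ow) v root h)
    · simp only [ne_eq, hnb, not_false_eq_true, if_true]
      exact ih _ _ _ h

-- B's phase-1 face fold preserves every present binding of the group map
lemma pvFace_mono (bi : List Int) (v : Int) (fs : List (List Int)) :
    ∀ (st : List Int × PySem.Dict Int Int) (k r : Int),
    st.2.get? k = some r → (fs.foldl (pvB_face bi v) st).2.get? k = some r := by
  induction fs with
  | nil => intro st k r h; exact h
  | cons f t ih =>
    intro st k r h
    simp only [List.foldl_cons, pvB_face]
    by_cases hnb : PySem.Set.diff (PySem.Set.ofList f) bi = []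
    · simp only [hnb, if_true]
      exact ih _ _ _ (pvB_inner_mono v f st k r h)
    · simp only [hnb, if_false]
      exact ih _ _ _ h

-- phase 1 only appends to done
lemma pvPhase1_done (vtf : List (Int × List (List Int))) (bi : List Int) :
    ∀ (fuel : Nat) (q done : List Int) (ow : PySem.Dict Int Int),
    pvB_phase1 vtf bi fuel q done ow
    = (done ++ (pvB_phase1 vtf bi fuel q [] ow).1, (pvB_phase1 vtf bi fuel q [] ow).2) := by
  intro fuel
  induction fuel with
  | zero => intro q done ow; simp [pvB_phase1]
  | succ n ih =>
    intro q done ow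
    cases q with
    | nil => simp [pvB_phase1]
    | cons v rest =>
      simp only [pvB_phase1]
      rw [ih _ (done ++ [v]), ih _ ([] ++ [v])]
      simp

-- phase 1 preserves every present binding of the group map
lemma pvPhase1_mono (vtf : List (Int × List (List Int))) (bi : List Int) :
    ∀ (fuel : Nat) (q done : List Int) (ow : PySem.Dict Int Int) (k r : Int),
    ow.get? k = some r → (pvB_phase1 vtf bi fuel q done ow).2.get? k = some r := by
  intro fuel
  induction fuel with
  | zero => intro q done ow k r h; exact h
  | succ n ih =>
    intro q done ow k r h
    cases q with
    | nil => exact h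
    | cons v rest =>
      simp only [pvB_phase1]
      exact ih _ _ _ _ _ (pvFace_mono bi v _ _ _ _ h)

-- the sets-only fold equals B's accumulation fold for one vertex
lemma pvSets_eq_acc (bi : List Int) (root : Int) (fs : List (List Int)) :
    ∀ (sets : PySem.Dict Int (PySem.Set Int)),
    sets.contains root = true → sets.keys.Nodup →
    fs.foldl (pvA_setsStep bi root) sets
    = fs.foldl (fun res2 face => res2.insert root (PySem.Set.union (res2.getD root [])
        (PySem.Set.diff (PySem.Set.ofList face) bi))) sets := by
  induction fs with
  | nil => intro sets _ _; rfl
  | cons f t ih =>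
    intro sets hc hn
    simp only [List.foldl_cons, pvA_setsStep]
    by_cases hnb : PySem.Set.diff (PySem.Set.ofList f) bi = []
    · simp only [ne_eq, hnb, not_true_eq_false, if_false]
      have : sets.insert root (PySem.Set.union (sets.getD root []) []) = sets :=
        pvDict_insert_getD_self sets root [] hc hn
      rw [this]
      exact ih sets hc hn
    · simp only [ne_eq, hnb, not_false_eq_true, if_true]
      have hkeys : (sets.insert root (PySem.Set.update (sets.getD root []) (PySem.Set.diff (PySem.Set.ofList f) bi))).keys = sets.keys :=
        PySem.Dict.keys_insert_of_contains _ _ hc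
      exact ih _ (PySem.Dict.contains_insert_self _ _ _) (hkeys ▸ hn)

-- the sets-only fold does not change the key list
lemma pvSets_keys (bi : List Int) (root : Int) (fs : List (List Int)) :
    ∀ (sets : PySem.Dict Int (PySem.Set Int)), sets.contains root = true →
    (fs.foldl (pvA_setsStep bi root) sets).keys = sets.keys := by
  induction fs with
  | nil => intro sets _; rfl
  | cons f t ih =>
    intro sets hc
    simp only [List.foldl_cons, pvA_setsStep]
    by_cases hnb : PySem.Set.diff (PySem.Set.ofList f) bi = []
    · simp only [ne_eq, hnb, not_true_eq_false, if_false]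
      exact ih sets hc
    · simp only [ne_eq, hnb, not_false_eq_true, if_true]
      rw [ih _ (PySem.Dict.contains_insert_self _ _ _)]
      exact PySem.Dict.keys_insert_of_contains _ _ hc

-- B's inner discovery fold keeps every queued vertex a key of the group map
lemma pvB_inner_queue (v : Int) (face : List Int) :
    ∀ (st : List Int × PySem.Dict Int Int),
    (∀ x ∈ st.1, st.2.contains x = true) →
    ∀ x ∈ (face.foldl (fun st2 u =>
      if st2.2.contains u then st2
      else (st2.1 ++ [u], st2.2.insert u (st2.2.getD v v))) st).1,
    (face.foldl (fun st2 u =>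
      if st2.2.contains u then st2
      else (st2.1 ++ [u], st2.2.insert u (st2.2.getD v v))) st).2.contains x = true := by
  induction face with
  | nil => intro st h; exact h
  | cons u t ih =>
    intro st h
    simp only [List.foldl_cons]
    by_cases hc : st.2.contains u = true
    · simp only [hc, if_true]; exact ih st h
    · simp only [hc, if_false, Bool.false_eq_true]
      apply ih
      intro x hx
      rw [PySem.Dict.contains_insert]
      rcases List.mem_append.mp hx with hx | hx
      · rw [h x hx]; simp
      · simp only [List.mem_singleton] at hx; subst hx; simp

lemma pvFace_queue (bi : List Int) (v : Int) (fs : List (List Int)) :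
    ∀ (st : List Int × PySem.Dict Int Int),
    (∀ x ∈ st.1, st.2.contains x = true) →
    ∀ x ∈ (fs.foldl (pvB_face bi v) st).1, (fs.foldl (pvB_face bi v) st).2.contains x = true := by
  induction fs with
  | nil => intro st h; exact h
  | cons f t ih =>
    intro st h
    simp only [List.foldl_cons, pvB_face]
    by_cases hnb : PySem.Set.diff (PySem.Set.ofList f) bi = []
    · simp only [hnb, if_true]
      exact ih _ (pvB_inner_queue v f st h)
    · simp only [hnb, if_false]
      exact ih _ h

-- the inner discovery fold only adds bindings with value group[v]
lemma pvB_inner_vals (v : Int) (P : Int → Prop) (face : List Int) :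
    ∀ (st : List Int × PySem.Dict Int Int) (root : Int),
    st.2.get? v = some root → P root →
    (∀ k r, st.2.get? k = some r → P r) →
    ∀ k r, (face.foldl (fun st2 u =>
      if st2.2.contains u then st2
      else (st2.1 ++ [u], st2.2.insert u (st2.2.getD v v))) st).2.get? k = some r → P r := by
  induction face with
  | nil => intro st root _ _ hall k r h; exact hall k r h
  | cons u t ih =>
    intro st root hv hP hall
    simp only [List.foldl_cons]
    by_cases hc : st.2.contains u = true
    · simp only [hc, if_true]; exact ih st root hv hP hall
    · simp only [hc, if_false, Bool.false_eq_true]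
      have hu : v ≠ u := by
        intro e; subst e
        rw [PySem.Dict.contains_eq_isSome_get?, hv] at hc; simp at hc
      have hroot : st.2.getD v v = root := PySem.Dict.getD_of_get?_eq_some _ _ hv
      apply ih _ root
      · simpa [PySem.Dict.get?_insert_of_ne _ _ hu] using hv
      · exact hP
      · intro k r h
        rw [PySem.Dict.get?_insert] at h
        split_ifs at h with hk
        · rw [hroot] at h; cases h; exact hP
        · exact hall k r h

lemma pvFace_vals (bi : List Int) (v : Int) (P : Int → Prop) (fs : List (List Int)) :
    ∀ (st : List Int × PySem.Dict Int Int) (root : Int),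
    st.2.get? v = some root → P root →
    (∀ k r, st.2.get? k = some r → P r) →
    ∀ k r, (fs.foldl (pvB_face bi v) st).2.get? k = some r → P r := by
  induction fs with
  | nil => intro st root _ _ hall k r h; exact hall k r h
  | cons f t ih =>
    intro st root hv hP hall
    simp only [List.foldl_cons, pvB_face]
    by_cases hnb : PySem.Set.diff (PySem.Set.ofList f) bi = []
    · simp only [hnb, if_true]
      exact ih _ root (pvB_inner_mono v f st v root hv) hP
        (pvB_inner_vals v P f st root hv hP hall)
    · simp only [hnb, if_false]
      exact ih _ root hv hP hall

-- the sets-only fold keeps every stored set duplicate-free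
lemma pvSets_nodupVals (bi : List Int) (root : Int) (fs : List (List Int)) :
    ∀ (sets : PySem.Dict Int (PySem.Set Int)),
    (∀ k s, sets.get? k = some s → s.Nodup) →
    ∀ k s, (fs.foldl (pvA_setsStep bi root) sets).get? k = some s → s.Nodup := by
  induction fs with
  | nil => intro sets hall k s h; exact hall k s h
  | cons f t ih =>
    intro sets hall
    simp only [List.foldl_cons, pvA_setsStep]
    by_cases hnb : PySem.Set.diff (PySem.Set.ofList f) bi = []
    · simp only [ne_eq, hnb, not_true_eq_false, if_false]
      exact ih sets hall
    · simp only [ne_eq, hnb, not_false_eq_true, if_true]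
      apply ih
      intro k s h
      rw [PySem.Dict.get?_insert] at h
      split_ifs at h with hk
      · cases h
        apply PySem.Set.nodup_update
        rw [PySem.Dict.getD_eq_get?_getD]
        cases hg : sets.get? root with
        | none => simp
        | some s0 => simpa [hg] using hall root s0 hg
      · exact hall k s h

-- the invariant survives one dequeue step
lemma pvInv_step (bi : List Int) (v root : Int)
    (rest : List Int) (ow : PySem.Dict Int Int) (sets : PySem.Dict Int (PySem.Set Int))
    (hInv : pvInv (v :: rest) ow sets) (hv : ow.get? v = some root)
    (fs : List (List Int)) :
    pvInv (fs.foldl (pvB_face bi v) (rest, ow)).1 (fs.foldl (pvB_face bi v) (rest, ow)).2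
      (fs.foldl (pvA_setsStep bi root) sets) := by
  obtain ⟨h1, h2, h3, h4⟩ := hInv
  have hcroot : sets.contains root = true := h2 v root hv
  have hkeys := pvSets_keys bi root fs sets hcroot
  refine ⟨?_, ?_, ?_, ?_⟩
  · exact pvFace_queue bi v fs (rest, ow) (fun x hx => h1 x (List.mem_cons_of_mem v hx))
  · intro k r h
    have := pvFace_vals bi v (fun r => sets.contains r = true) fs (rest, ow) root hv hcroot
      (fun k r h => h2 k r h) k r h
    simp only at this
    rw [PySem.Dict.contains_iff_mem_keys] at this ⊢
    rw [hkeys]; exact this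
  · rw [hkeys]; exact h3
  · exact pvSets_nodupVals bi root fs sets h4

-- main simulation: A's loop = phase 1 plus the accumulation over the discovery order
lemma pvMain (vtf : List (Int × List (List Int))) (bi : List Int) :
    ∀ (fuel : Nat) (q : List Int) (ow : PySem.Dict Int Int)
      (sets : PySem.Dict Int (PySem.Set Int)), pvInv q ow sets →
    pvA_loop vtf bi fuel q ow sets
    = ((pvB_phase1 vtf bi fuel q [] ow).2,
       (pvB_phase1 vtf bi fuel q [] ow).1.foldl
         (pvB_acc vtf bi (pvB_phase1 vtf bi fuel q [] ow).2) sets) := by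
  intro fuel
  induction fuel with
  | zero => intro q ow sets _; rfl
  | succ n ih =>
    intro q ow sets hInv
    cases q with
    | nil => rfl
    | cons v rest =>
      have hcv : ow.contains v = true := hInv.1 v List.mem_cons_self
      have hv : ow.get? v = some (ow.getD v v) := by
        rw [PySem.Dict.contains_eq_isSome_get?] at hcv
        cases hg : ow.get? v with
        | none => rw [hg] at hcv; simp at hcv
        | some r => rw [PySem.Dict.getD_eq_get?_getD, hg]; rfl
      simp only [pvA_loop, pvB_phase1]
      rw [pvFace_split bi v (ow.getD v v) _ rest ow sets hv]
      rw [ih _ _ _ (pvInv_step bi v (ow.getD v v) rest ow sets hInv hv _)]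
      rw [pvPhase1_done vtf bi n _ ([] ++ [v]) _]
      set fsv := ((PySem.Dict.mk vtf).get? v).getD [] with hfsv
      set st := List.foldl (pvB_face bi v) (rest, ow) fsv with hst
      set P := pvB_phase1 vtf bi n st.1 [] st.2 with hP
      have hP2v : P.2.get? v = some (ow.getD v v) :=
        pvPhase1_mono vtf bi n _ _ _ v _ (pvFace_mono bi v _ _ _ _ hv)
      have hacc : pvB_acc vtf bi P.2 sets v
          = List.foldl (pvA_setsStep bi (ow.getD v v)) sets fsv := by
        unfold pvB_acc
        rw [PySem.Dict.getD_of_get?_eq_some _ _ hP2v]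
        exact (pvSets_eq_acc bi (ow.getD v v) fsv sets (hInv.2.1 v _ hv) hInv.2.2.1).symm
      simp only [List.nil_append, List.cons_append, List.foldl_cons]
      rw [hacc]

-- the seeding loops: values are the keys themselves
lemma pvOwner0_valkey (corn : List Int) :
    ∀ (d : PySem.Dict Int Int), (∀ k r, d.get? k = some r → r = k) →
    ∀ k r, (corn.foldl (fun d c => d.insert c c) d).get? k = some r → r = k := by
  induction corn with
  | nil => intro d h k r hg; exact h k r hg
  | cons c t ih =>
    intro d h
    simp only [List.foldl_cons]
    apply ih
    intro k r hg
    rw [PySem.Dict.get?_insert] at hg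
    split_ifs at hg with hk
    · cases hg; exact hk.symm
    · exact h k r hg

-- B's seeding loop computes A's (tobevisited, owner0) pair
lemma pvInit_eq (corn : List Int) :
    ∀ (d : PySem.Dict Int Int), d.keys.Nodup → (∀ k r, d.get? k = some r → r = k) →
    corn.foldl (fun (st : List Int × PySem.Dict Int Int) c =>
        if st.2.contains c then st else (st.1 ++ [c], st.2.insert c c)) (d.keys, d)
    = ((corn.foldl (fun d c => d.insert c c) d).keys,
       corn.foldl (fun d c => d.insert c c) d) := by
  induction corn with
  | nil => intro d _ _; rfl
  | cons c t ih =>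
    intro d hn hval
    simp only [List.foldl_cons]
    by_cases hc : d.contains c = true
    · have hg : d.get? c = some (d.getD c c) := by
        rw [PySem.Dict.contains_eq_isSome_get?] at hc
        cases hg : d.get? c with
        | none => rw [hg] at hc; simp at hc
        | some r => rw [PySem.Dict.getD_eq_get?_getD, hg]; rfl
      have hdc : d.getD c c = c := hval c _ hg
      have hins : d.insert c c = d := by
        have := pvDict_insert_getD_self d c c hc hn
        rw [hdc] at this; exact this
      simp only [hc, if_true, hins]
      exact ih d hn hval
    · simp only [hc, if_false, Bool.false_eq_true]
      have hkeys : (d.insert c c).keys = d.keys ++ [c] :=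
        PySem.Dict.keys_insert_of_not_contains _ _ (by simpa using hc)
      rw [← hkeys]
      apply ih
      · rw [hkeys]
        refine List.Nodup.append hn (List.nodup_singleton c) ?_
        rw [List.disjoint_singleton]
        intro hx
        rw [← PySem.Dict.contains_iff_mem_keys] at hx
        exact hc hx
      · intro k r hg
        rw [PySem.Dict.get?_insert] at hg
        split_ifs at hg with hk
        · cases hg; exact hk.symm
        · exact hval k r hg

-- the seeding of the result/sets map stores only duplicate-free sets
lemma pvSeed_nodupVals (corn : List Int) :
    ∀ (d : PySem.Dict Int (PySem.Set Int)), (∀ k s, d.get? k = some s → s.Nodup) →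
    ∀ k s, (corn.foldl (fun d c => d.insert c PySem.Set.empty) d).get? k = some s → s.Nodup := by
  induction corn with
  | nil => intro d h k s hg; exact h k s hg
  | cons c t ih =>
    intro d h
    simp only [List.foldl_cons]
    apply ih
    intro k s hg
    rw [PySem.Dict.get?_insert] at hg
    split_ifs at hg with hk
    · cases hg; exact List.nodup_nil
    · exact h k s hg

-- B's accumulation pass stores only duplicate-free sets
lemma pvAcc_nodupVals (vtf : List (Int × List (List Int))) (bi : List Int)
    (group : PySem.Dict Int Int) :
    ∀ (order : List Int) (sets : PySem.Dict Int (PySem.Set Int)),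
    (∀ k s, sets.get? k = some s → s.Nodup) →
    ∀ k s, (order.foldl (pvB_acc vtf bi group) sets).get? k = some s → s.Nodup := by
  have hone : ∀ (r : Int) (fs : List (List Int)) (sets : PySem.Dict Int (PySem.Set Int)),
      (∀ k s, sets.get? k = some s → s.Nodup) →
      ∀ k s, (fs.foldl (fun res2 face => res2.insert r (PySem.Set.union (res2.getD r [])
        (PySem.Set.diff (PySem.Set.ofList face) bi))) sets).get? k = some s → s.Nodup := by
    intro r fs
    induction fs with
    | nil => intro sets h k s hg; exact h k s hg
    | cons f t ih =>
      intro sets h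
      simp only [List.foldl_cons]
      apply ih
      intro k s hg
      rw [PySem.Dict.get?_insert] at hg
      split_ifs at hg with hk
      · cases hg
        apply PySem.Set.nodup_union
        rw [PySem.Dict.getD_eq_get?_getD]
        cases hg2 : sets.get? r with
        | none => simp
        | some s0 => simpa using h r s0 hg2
      · exact h k s hg
  intro order
  induction order with
  | nil => intro sets h k s hg; exact h k s hg
  | cons v t ih =>
    intro sets h
    simp only [List.foldl_cons]
    exact ih _ (hone (group.getD v v) _ sets h)

-- ===== VERDICT (by name: the statement is the Claim_ definition above) =====
theorem get_neighbours_to_border_py_spec : Claim_equal_get_neighbours_to_border_py := by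
  unfold Claim_equal_get_neighbours_to_border_py
  intro vtf bi corn _ _
  unfold Spec_get_neighbours_to_border_py
  unfold get_neighbours_to_border_py get_neighbours_to_border_py_alt
  set owner0 : PySem.Dict Int Int := corn.foldl (fun d c => d.insert c c) PySem.Dict.empty with how0
  set sets0 : PySem.Dict Int (PySem.Set Int) := corn.foldl (fun d c => d.insert c PySem.Set.empty) PySem.Dict.empty with hs0
  have hval : ∀ k r, owner0.get? k = some r → r = k := by
    apply pvOwner0_valkey
    intro k r h; simp [PySem.Dict.get?_empty] at h
  have hnd0 : owner0.keys.Nodup := by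
    rw [how0]
    exact PySem.Dict.nodup_keys_foldl_insert corn (fun _ c => c) PySem.Dict.empty (by simp)
  have hndS : sets0.keys.Nodup := by
    rw [hs0]
    exact PySem.Dict.nodup_keys_foldl_insert corn (fun _ _ => PySem.Set.empty) PySem.Dict.empty (by simp)
  have hkeqs : owner0.keys = sets0.keys := by
    rw [how0, hs0, PySem.Dict.keys_foldl_insert, PySem.Dict.keys_foldl_insert]
    rfl
  have hinit : corn.foldl (fun (st : List Int × PySem.Dict Int Int) c =>
      if st.2.contains c then st else (st.1 ++ [c], st.2.insert c c)) ([], PySem.Dict.empty)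
      = (owner0.keys, owner0) := by
    have h0 : (∀ k r, (PySem.Dict.empty : PySem.Dict Int Int).get? k = some r → r = k) := by
      intro k r h; simp [PySem.Dict.get?_empty] at h
    exact pvInit_eq corn PySem.Dict.empty (by simp) h0
  have hInv0 : pvInv owner0.keys owner0 sets0 := by
    refine ⟨?_, ?_, hndS, ?_⟩
    · intro x hx; rw [PySem.Dict.contains_iff_mem_keys]; exact hx
    · intro k r h
      have hk : r = k := hval k r h
      subst hk
      have : owner0.contains r = true := by
        rw [PySem.Dict.contains_eq_isSome_get?, h]; rfl
      rw [PySem.Dict.contains_iff_mem_keys] at this ⊢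
      rw [← hkeqs]; exact this
    · rw [hs0]
      apply pvSeed_nodupVals
      intro k s h; simp [PySem.Dict.get?_empty] at h
  simp only [hinit]
  rw [pvMain vtf bi _ owner0.keys owner0 sets0 hInv0]
  set P := pvB_phase1 vtf bi (corn.length + (vtf.map (fun p => (p.2.map List.length).sum)).sum) owner0.keys [] owner0 with hPdef
  set res := P.1.foldl (pvB_acc vtf bi P.2) sets0 with hres
  apply List.map_congr_left
  intro p hp
  have hmem : p ∈ owner0.keys := by
    rw [how0, PySem.Dict.keys_foldl_insert]
    rw [PySem.Set.mem_update]
    exact Or.inr hp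
  have hg0 : owner0.get? p = some p := by
    have hc : owner0.contains p = true := by
      rw [PySem.Dict.contains_iff_mem_keys]; exact hmem
    rw [PySem.Dict.contains_eq_isSome_get?] at hc
    cases hg : owner0.get? p with
    | none => rw [hg] at hc; simp at hc
    | some r => rw [hval p r hg]
  have hgP : P.2.get? p = some p := pvPhase1_mono vtf bi _ _ _ _ p p hg0
  have hroot : P.2.getD p p = p := PySem.Dict.getD_of_get?_eq_some _ _ hgP
  rw [hroot]
  have hnodup : (res.getD p []).Nodup := by
    rw [PySem.Dict.getD_eq_get?_getD]
    cases hg : res.get? p with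
    | none => simp
    | some s =>
      have := pvAcc_nodupVals vtf bi P.2 P.1 sets0 (by
        rw [hs0]
        apply pvSeed_nodupVals
        intro k s h; simp [PySem.Dict.get?_empty] at h) p s (by rw [← hres]; exact hg)
      simpa [hg] using this
  show (PySem.Set.ofList (res.getD p [])).diff bi = (res.getD p []).diff bi
  rw [PySem.Set.ofList_eq_self_of_nodup _ hnodup]
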